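-- pv_equiv track=rewrite | github.com/SuperSayianGodCode/SimulationLab | MODI.py | row_panelty
-- ===== SOURCE A (Python) =====
-- def row_panelty(arr,m,n):
-- 	r = 0
-- 	c = 0
-- 	id = []
-- 	while (r < m):
-- 		first = 1000
-- 		second = 1000
-- 		for c in range(0,n):
--
-- 			if(arr[r][c] <= first):
-- 				second = first
-- 				first = arr[r][c]
--
-- 			elif(arr[r][c]<second and arr[r][c]>first):
-- 				second = arr[r][c]
--
-- 			c= c+1
--
--
-- 		x = second - first
-- 		id.append(x)
-- 		r = r + 1
-- 	return id
-- ===== SOURCE B (Python) =====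
-- def row_panelty(arr, m, n):
--     out = []
--     for r in range(m):
--         vals = [arr[r][c] for c in range(n)]
--         two = sorted(vals + [1000, 1000])[:2]
--         out.append(two[1] - two[0])
--     return out
-- ===== Notes on version B (the rewrite author's own statement) =====
-- stated objective: simpler
-- what changed: Replaces A's single-pass running two-minimum state machine with sorting each row's values together with the two 1000 sentinels and taking the difference of the first two elements.
import Mathlib
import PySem

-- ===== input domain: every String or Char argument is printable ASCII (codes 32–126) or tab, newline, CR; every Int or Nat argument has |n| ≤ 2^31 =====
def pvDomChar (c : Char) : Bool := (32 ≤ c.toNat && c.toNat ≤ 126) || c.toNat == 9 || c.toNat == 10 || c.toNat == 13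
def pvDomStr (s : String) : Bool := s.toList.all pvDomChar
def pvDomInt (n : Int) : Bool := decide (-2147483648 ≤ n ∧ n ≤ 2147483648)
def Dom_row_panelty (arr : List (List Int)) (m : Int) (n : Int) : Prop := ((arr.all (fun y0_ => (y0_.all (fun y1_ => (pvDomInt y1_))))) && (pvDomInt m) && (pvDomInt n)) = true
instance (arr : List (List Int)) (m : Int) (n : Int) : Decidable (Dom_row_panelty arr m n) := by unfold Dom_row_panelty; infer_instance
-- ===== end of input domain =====

-- B replaces A's running two-minimum tracking by sorting each sentinel-augmented row and
-- taking the first two elements; objective: simpler.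

-- ===== PORT A =====
-- A's inner for-loop body over column c (the dead `c = c + 1` inside A's for-loop has no
-- effect, since `for` rebinds c, and is omitted).
def rowPaneltyStep (fs : Int × Int) (v : Int) : Int × Int :=
  if v ≤ fs.1 then (v, fs.1)
  else if v < fs.2 ∧ fs.1 < v then (fs.1, v)
  else fs

def row_panelty (arr : List (List Int)) (m : Int) (n : Int) : List Int :=
  (PySem.List.pyRange 0 m 1).foldl (fun id r =>
    let fs := (PySem.List.pyRange 0 n 1).foldl
      (fun fs c => rowPaneltyStep fs (PySem.List.pyGetD (PySem.List.pyGetD arr r []) c 0))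
      (1000, 1000)
    id ++ [fs.2 - fs.1]) []

-- ===== PORT B =====
def row_panelty_alt (arr : List (List Int)) (m : Int) (n : Int) : List Int :=
  (PySem.List.pyRange 0 m 1).map (fun r =>
    let vals := (PySem.List.pyRange 0 n 1).map
      (fun c => PySem.List.pyGetD (PySem.List.pyGetD arr r []) c 0)
    let two := (PySem.List.sorted (vals ++ [1000, 1000]) (fun x => x) false).take 2
    PySem.List.pyGetD two 1 0 - PySem.List.pyGetD two 0 0)

-- ===== PRECONDITION & SPEC =====
-- Pre_ excludes exactly the inputs where A raises IndexError: with n > 0 (otherwise no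
-- element is ever indexed), m beyond the number of rows or some row among the first m shorter than n.
def Pre_row_panelty (arr : List (List Int)) (m : Int) (n : Int) : Prop :=
  0 < n → m ≤ (arr.length : Int) ∧ ∀ row ∈ arr.take m.toNat, n ≤ (row.length : Int)

instance (arr : List (List Int)) (m : Int) (n : Int) : Decidable (Pre_row_panelty arr m n) := by
  unfold Pre_row_panelty; infer_instance

def pvWitness_row_panelty : List (List Int) × Int × Int := ([[5, 1, 9], [2, 2, 2]], 2, 3)

def Spec_row_panelty (arr : List (List Int)) (m : Int) (n : Int) (out : List Int) : Prop := out = row_panelty_alt arr m n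
instance (arr : List (List Int)) (m : Int) (n : Int) (out : List Int) : Decidable (Spec_row_panelty arr m n out) := by unfold Spec_row_panelty; infer_instance

-- ===== CLAIM (what is proved, stated in full; the proofs are below) =====
def Claim_equal_row_panelty : Prop := ∀ (arr : List (List Int)) (m : Int) (n : Int), Dom_row_panelty arr m n → Pre_row_panelty arr m n → Spec_row_panelty arr m n (row_panelty arr m n)

-- ===== LEMMAS AND PROOFS =====

-- sorting Ints by the identity key depends only on the multiset of elements
theorem sorted_congr_perm (xs ys : List Int) (h : xs.Perm ys) :
    PySem.List.sorted xs (fun x => x) false = PySem.List.sorted ys (fun x => x) false := by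
  exact PySem.List.sorted_id_eq_of_perm_of_pairwise xs _
    ((PySem.List.sorted_perm ys (fun x => x) false).trans h.symm)
    (PySem.List.sorted_pairwise ys (fun x => x))

-- A's fold computes exactly the first two elements of the sorted multiset a :: b :: extra ++ l,
-- provided a ≤ b and every element of extra is ≥ b.
theorem twoMin_sorted (l : List Int) (a b : Int) (extra : List Int)
    (hab : a ≤ b) (hex : ∀ x ∈ extra, b ≤ x) :
    ∃ rest, PySem.List.sorted (a :: b :: (extra ++ l)) (fun x => x) false =
      (l.foldl rowPaneltyStep (a, b)).1 :: (l.foldl rowPaneltyStep (a, b)).2 :: rest := by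
  induction l generalizing a b extra with
  | nil =>
    refine ⟨PySem.List.sorted extra (fun x => x) false, ?_⟩
    simp only [List.append_nil, List.foldl_nil]
    apply PySem.List.sorted_id_eq_of_perm_of_pairwise
    · exact ((PySem.List.sorted_perm extra (fun x => x) false).cons b).cons a
    · refine List.pairwise_cons.mpr ⟨?_, List.pairwise_cons.mpr ⟨?_, ?_⟩⟩
      · intro x hx
        rcases List.mem_cons.mp hx with hx | hx
        · omega
        · exact le_trans hab (hex x ((PySem.List.mem_sorted extra (fun x => x) false x).mp hx))
      · intro x hx
        exact hex x ((PySem.List.mem_sorted extra (fun x => x) false x).mp hx)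
      · exact PySem.List.sorted_pairwise extra (fun x => x)
  | cons v l ih =>
    simp only [List.foldl_cons]
    by_cases h1 : v ≤ a
    · rw [show rowPaneltyStep (a, b) v = (v, a) by simp [rowPaneltyStep, h1]]
      obtain ⟨rest, hs⟩ := ih v a (b :: extra) h1 (by
        intro x hx
        rcases List.mem_cons.mp hx with hx | hx
        · omega
        · exact le_trans hab (hex x hx))
      refine ⟨rest, ?_⟩
      rw [← hs]
      apply sorted_congr_perm
      apply List.perm_iff_count.mpr
      intro x
      simp [List.count_cons, List.count_append]
      split_ifs <;> omega
    · by_cases h2 : v < b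
      · rw [show rowPaneltyStep (a, b) v = (a, v) by simp [rowPaneltyStep, h1, h2]]
        obtain ⟨rest, hs⟩ := ih a v (b :: extra) (by omega) (by
          intro x hx
          rcases List.mem_cons.mp hx with hx | hx
          · omega
          · exact le_trans (le_of_lt h2) (hex x hx))
        refine ⟨rest, ?_⟩
        rw [← hs]
        apply sorted_congr_perm
        apply List.perm_iff_count.mpr
        intro x
        simp [List.count_cons, List.count_append]
        split_ifs <;> omega
      · rw [show rowPaneltyStep (a, b) v = (a, b) by simp [rowPaneltyStep, h1, h2]]
        obtain ⟨rest, hs⟩ := ih a b (v :: extra) hab (by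
          intro x hx
          rcases List.mem_cons.mp hx with hx | hx
          · omega
          · exact hex x hx)
        refine ⟨rest, ?_⟩
        rw [← hs]
        apply sorted_congr_perm
        apply List.perm_iff_count.mpr
        intro x
        simp [List.count_cons, List.count_append]
        split_ifs <;> omega

-- per-row agreement: the fold result's difference equals B's sorted-take-2 difference
theorem row_agree (vals : List Int) :
    (vals.foldl rowPaneltyStep (1000, 1000)).2 - (vals.foldl rowPaneltyStep (1000, 1000)).1 =
      (let two := (PySem.List.sorted (vals ++ [1000, 1000]) (fun x => x) false).take 2
       PySem.List.pyGetD two 1 0 - PySem.List.pyGetD two 0 0) := by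
  obtain ⟨rest, hs⟩ := twoMin_sorted vals 1000 1000 [] le_rfl (by simp)
  have hperm : (vals ++ [1000, 1000]).Perm (1000 :: 1000 :: ([] ++ vals)) := by
    simpa using (List.perm_append_comm (l₁ := vals) (l₂ := [1000, 1000]))
  rw [sorted_congr_perm _ _ hperm, hs]
  simp [PySem.List.pyGetD, PySem.List.pyGet?, PySem.List.pyIdx?]

-- ===== VERDICT (by name: the statement is the Claim_ definition above) =====
theorem row_panelty_spec : Claim_equal_row_panelty := by
  intro arr m n _ _
  show row_panelty arr m n = row_panelty_alt arr m n
  unfold row_panelty row_panelty_alt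
  refine Eq.trans ((PySem.List.foldl_append_singleton_eq_map
      (fun r => ((PySem.List.pyRange 0 n 1).foldl
          (fun fs c => rowPaneltyStep fs (PySem.List.pyGetD (PySem.List.pyGetD arr r []) c 0))
          (1000, 1000)).2 -
        ((PySem.List.pyRange 0 n 1).foldl
          (fun fs c => rowPaneltyStep fs (PySem.List.pyGetD (PySem.List.pyGetD arr r []) c 0))
          (1000, 1000)).1)
      (PySem.List.pyRange 0 m 1) []).trans (List.nil_append _)) ?_
  apply List.map_congr_left
  intro r _
  have h := row_agree ((PySem.List.pyRange 0 n 1).map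
    (fun c => PySem.List.pyGetD (PySem.List.pyGetD arr r []) c 0))
  rw [List.foldl_map] at h
  exact h
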